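-- pv_equiv track=rewrite | github.com/pataluc/AoC | 2025/day10/ex.py | toggle1
-- ===== SOURCE A (Python) =====
-- def toggle1(current: str, buttons: set[int]) -> str:
--     r = ''
--     for i in range(len(current)):
--         if i in buttons:
--             r += '#' if current[i] == '.' else '.'
--         else:
--             r += current[i]
--     return r
-- ===== SOURCE B (Python) =====
-- def toggle1(current: str, buttons: set[int]) -> str:
--     lst = list(current)
--     for i in buttons:
--         if 0 <= i < len(lst):
--             lst[i] = '#' if lst[i] == '.' else '.'
--     return ''.join(lst)
-- ===== Notes on version B (the rewrite author's own statement) =====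
-- stated objective: simpler
-- what changed: Instead of scanning every character position and testing set membership while concatenating a result string, B mutates a char list in place, iterating only over the button indices with a range guard, then joins.
import Mathlib
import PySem

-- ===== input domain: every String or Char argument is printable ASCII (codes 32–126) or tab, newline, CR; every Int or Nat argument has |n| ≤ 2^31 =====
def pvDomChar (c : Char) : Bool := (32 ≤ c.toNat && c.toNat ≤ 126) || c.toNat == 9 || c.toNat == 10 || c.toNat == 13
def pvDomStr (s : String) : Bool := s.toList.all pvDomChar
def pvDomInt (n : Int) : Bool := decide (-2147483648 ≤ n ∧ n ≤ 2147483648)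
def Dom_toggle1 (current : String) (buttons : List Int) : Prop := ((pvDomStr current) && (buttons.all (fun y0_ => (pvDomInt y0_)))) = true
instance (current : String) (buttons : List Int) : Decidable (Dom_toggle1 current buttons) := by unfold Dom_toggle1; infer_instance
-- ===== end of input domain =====

-- B replaces A's full scan + per-position membership test by in-place toggling of only the button positions; objective: simpler.


-- shared one-liner for Python's `'#' if c == '.' else '.'` (appears verbatim in both A and B)
def toggleC (c : Char) : Char := if c = '.' then '#' else '.'

-- ===== PORT A =====
-- r = ''; for i in range(len(current)): r += toggled/plain char; return r
def toggle1 (current : String) (buttons : List Int) : String :=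
  String.mk ((List.range current.toList.length).foldl (fun (r : List Char) (i : Nat) =>
    if (i : Int) ∈ buttons then r ++ [toggleC (current.toList.getD i ' ')]
    else r ++ [current.toList.getD i ' ']) [])

-- ===== PORT B =====
-- lst = list(current); for i in buttons: if 0 <= i < len(lst): lst[i] = toggled; return ''.join(lst)
def toggle1_alt (current : String) (buttons : List Int) : String :=
  String.mk (buttons.foldl (fun lst i =>
    if 0 ≤ i ∧ i < (lst.length : Int) then
      lst.set i.toNat (toggleC (lst.getD i.toNat ' '))
    else lst) current.toList)

-- ===== PRECONDITION & SPEC =====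
-- buttons is a Python set[int]; per the type convention the list holds its DISTINCT elements.
def Pre_toggle1 (current : String) (buttons : List Int) : Prop := buttons.Nodup
instance (current : String) (buttons : List Int) : Decidable (Pre_toggle1 current buttons) := by unfold Pre_toggle1; infer_instance
def pvWitness_toggle1 : String × List Int := ("..##a", [0, 3, 7, -1])

def Spec_toggle1 (current : String) (buttons : List Int) (out : String) : Prop := out = toggle1_alt current buttons
instance (current : String) (buttons : List Int) (out : String) : Decidable (Spec_toggle1 current buttons out) := by unfold Spec_toggle1; infer_instance

-- ===== CLAIM (what is proved, stated in full; the proofs are below) =====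
def Claim_equal_toggle1 : Prop := ∀ (current : String) (buttons : List Int), Dom_toggle1 current buttons → Pre_toggle1 current buttons → Spec_toggle1 current buttons (toggle1 current buttons)

-- ===== LEMMAS AND PROOFS =====

-- B's loop body
def bstep (lst : List Char) (i : Int) : List Char :=
  if 0 ≤ i ∧ i < (lst.length : Int) then
    lst.set i.toNat (toggleC (lst.getD i.toNat ' '))
  else lst

lemma bstep_length (lst : List Char) (i : Int) : (bstep lst i).length = lst.length := by
  unfold bstep; split <;> simp

lemma bfold_length (l : List Int) (lst : List Char) :
    (l.foldl (bstep) lst).length = lst.length := by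
  induction l generalizing lst with
  | nil => rfl
  | cons i l ih => simp [List.foldl_cons, ih, bstep_length]

-- the value at position j after B's loop: toggled iff j ∈ l (l nodup)
lemma bfold_getD (l : List Int) (lst : List Char) (hnd : l.Nodup) (j : Nat) (hj : j < lst.length) :
    (l.foldl (bstep) lst).getD j ' ' =
      if ((j : Int) ∈ l) then toggleC (lst.getD j ' ') else lst.getD j ' ' := by
  induction l generalizing lst with
  | nil => simp
  | cons i l ih =>
    rcases List.nodup_cons.mp hnd with ⟨hi, hnd'⟩
    have hlen : (bstep lst i).length = lst.length := bstep_length lst i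
    have := ih (bstep lst i) hnd' (by rw [hlen]; exact hj)
    rw [List.foldl_cons, this]
    by_cases hji : (j : Int) = i
    · -- i is exactly j, in range; the step toggles position j, and j ∉ l
      have hjl' : ¬ ((j : Int) ∈ l) := by rw [hji] at *; exact hi
      have hstep : bstep lst i = lst.set j (toggleC (lst.getD j ' ')) := by
        unfold bstep
        rw [if_pos]
        · congr 1 <;> rw [← hji] <;> simp
        · constructor
          · rw [← hji]; exact Int.natCast_nonneg j
          · rw [← hji]; exact_mod_cast hj
      rw [if_neg hjl', hstep, if_pos (by simp [← hji]), List.getD, List.getElem?_set_self (by simpa using hj)]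
      simp [List.getD, hj]
    · -- position j untouched by this step
      have hstep : (bstep lst i).getD j ' ' = lst.getD j ' ' := by
        unfold bstep
        split
        · next h =>
          have : i.toNat ≠ j := by omega
          simp [List.getD, List.getElem?_set_ne this]
        · rfl
      rw [hstep]
      have : ((j:Int) ∈ i :: l) ↔ ((j:Int) ∈ l) := by simp [hji]
      rw [if_congr this rfl rfl]

-- A's loop builds the map over range
lemma afold_eq_map (g : Nat → Char) (n : Nat) :
    (List.range n).foldl (fun r i => r ++ [g i]) [] = (List.range n).map g :=
  PySem.List.foldl_append_singleton_eq_map _ _ _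

theorem toggle1_spec : Claim_equal_toggle1 := by
  intro current buttons _ hpre
  unfold Spec_toggle1 toggle1 toggle1_alt
  set cs := current.toList with hcs
  refine congrArg String.mk ?_
  have hfun : (fun (r : List Char) (i : Nat) =>
      if (i : Int) ∈ buttons then r ++ [toggleC (cs.getD i ' ')] else r ++ [cs.getD i ' '])
      = (fun (r : List Char) (i : Nat) =>
        r ++ [if (i : Int) ∈ buttons then toggleC (cs.getD i ' ') else cs.getD i ' ']) := by
    funext r i; split <;> rfl
  rw [hfun, afold_eq_map]
  have hBfold : buttons.foldl (fun lst i =>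
      if 0 ≤ i ∧ i < (lst.length : Int) then
        lst.set i.toNat (toggleC (lst.getD i.toNat ' ')) else lst) cs
      = buttons.foldl (bstep) cs := rfl
  rw [hBfold]
  have hlen : (buttons.foldl (bstep) cs).length = cs.length := bfold_length _ _
  apply List.ext_getElem (by simp [hlen])
  intro j h1 h2
  have hj : j < cs.length := by simpa using h1
  have hg : ((List.range cs.length).map
      (fun (i : Nat) => if ((i:Int) ∈ buttons) then toggleC (cs.getD i ' ') else cs.getD i ' '))[j]'h1
      = if ((j:Int) ∈ buttons) then toggleC (cs.getD j ' ') else cs.getD j ' ' := by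
    simp
  rw [hg]
  have hkey := bfold_getD buttons cs hpre j hj
  have hget : (buttons.foldl (bstep) cs)[j]'h2 = (buttons.foldl (bstep) cs).getD j ' ' := by
    rw [List.getD_eq_getElem _ _ (by omega)]
  rw [hget, hkey]
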